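-- pv_equiv track=rewrite | github.com/Nikita-Kapse/Drishyamitra | backend/routes/chat_routes.py | _find_person_by_name
-- ===== SOURCE A (Python) =====
-- def _find_person_by_name(name: str, persons: list) -> dict | None:
--     """
--     Match a name string against the loaded persons list.
--     Handles 'Person 1' style names and partial matches.
--     """
--     if not name:
--         return None
--     name_lower = name.strip().lower()
--     for p in persons:
--         if p["name"].lower() == name_lower:
--             return p
--     # Try partial match (e.g. "Mom" inside "Mom Smith")
--     for p in persons:
--         if name_lower in p["name"].lower():
--             return p
--     return None
-- ===== SOURCE B (Python) =====
-- def _find_person_by_name(name: str, persons: list) -> dict | None: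
--     """Single pass: return the first exact match eagerly, else the first partial match."""
--     if not name:
--         return None
--     name_lower = name.strip().lower()
--     first_partial = None
--     for p in persons:
--         pl = p["name"].lower()
--         if pl == name_lower:
--             return p
--         if first_partial is None and name_lower in pl:
--             first_partial = p
--     return first_partial
-- ===== Notes on version B (the rewrite author's own statement) =====
-- stated objective: simpler
-- what changed: Replaces A's two sequential scans (exact pass, then partial pass) with one pass that returns an exact match eagerly and remembers only the first partial match in a single variable.
import Mathlib
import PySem

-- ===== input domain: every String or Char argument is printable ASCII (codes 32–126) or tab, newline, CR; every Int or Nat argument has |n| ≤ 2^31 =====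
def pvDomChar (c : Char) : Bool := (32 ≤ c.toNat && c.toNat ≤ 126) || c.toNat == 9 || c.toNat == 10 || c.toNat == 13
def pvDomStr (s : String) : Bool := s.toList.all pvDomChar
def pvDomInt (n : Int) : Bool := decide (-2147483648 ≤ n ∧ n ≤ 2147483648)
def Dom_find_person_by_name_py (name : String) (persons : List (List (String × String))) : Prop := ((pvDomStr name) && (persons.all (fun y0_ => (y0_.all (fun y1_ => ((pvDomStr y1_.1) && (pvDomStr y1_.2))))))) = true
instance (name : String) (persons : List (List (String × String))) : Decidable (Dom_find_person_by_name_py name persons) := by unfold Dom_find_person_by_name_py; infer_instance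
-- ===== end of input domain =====

-- B replaces A's two sequential scans with one pass that returns an exact match eagerly
-- and remembers the first partial match (objective: simpler).


-- ===== PORT A =====
-- p["name"]: exact where the key is present (Pre_ requires that on every person)
def pvGetName (p : List (String × String)) : String :=
  ((PySem.Dict.mk p).get? "name").getD ""

-- first loop of A: exact match
def pvLoopExact (nl : String) : List (List (String × String)) → Option (List (String × String))
  | [] => none
  | p :: rest =>
      if PySem.Str.lower (pvGetName p) == nl then some p else pvLoopExact nl rest

-- second loop of A: partial match
def pvLoopPartial (nl : String) : List (List (String × String)) → Option (List (String × String))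
  | [] => none
  | p :: rest =>
      if PySem.Str.isIn nl (PySem.Str.lower (pvGetName p)) then some p else pvLoopPartial nl rest

def find_person_by_name_py (name : String) (persons : List (List (String × String))) : Option (List (String × String)) :=
  if name == "" then none
  else
    let name_lower := PySem.Str.lower (PySem.Str.strip name)
    match pvLoopExact name_lower persons with
    | some p => some p
    | none => pvLoopPartial name_lower persons

-- ===== PORT B =====
-- single pass carrying first_partial
def pvScan (nl : String) : List (List (String × String)) → Option (List (String × String)) → Option (List (String × String))
  | [], first_partial => first_partial
  | p :: rest, first_partial =>
      let pl := PySem.Str.lower (pvGetName p)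
      if pl == nl then some p
      else pvScan nl rest
        (if first_partial.isNone && PySem.Str.isIn nl pl then some p else first_partial)

def find_person_by_name_py_alt (name : String) (persons : List (List (String × String))) : Option (List (String × String)) :=
  if name == "" then none
  else
    let name_lower := PySem.Str.lower (PySem.Str.strip name)
    pvScan name_lower persons none

-- ===== PRECONDITION & SPEC =====
-- Pre_ excludes exactly the inputs on which both programs raise KeyError: a non-empty name
-- and a dict lacking the "name" key that is reached before any exact match.
def Pre_find_person_by_name_py (name : String) (persons : List (List (String × String))) : Prop :=
  name = "" ∨ ∀ i < persons.length, (PySem.Dict.mk (persons.getD i [])).contains "name" = false →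
    ∃ j < i, PySem.Str.lower (((PySem.Dict.mk (persons.getD j [])).get? "name").getD "") =
      PySem.Str.lower (PySem.Str.strip name)
instance (name : String) (persons : List (List (String × String))) : Decidable (Pre_find_person_by_name_py name persons) := by unfold Pre_find_person_by_name_py; infer_instance

def pvWitness_find_person_by_name_py : String × (List (List (String × String))) :=
  ("Mom", [[("name", "Dad Smith")], [("name", "Mom Smith")]])

def Spec_find_person_by_name_py (name : String) (persons : List (List (String × String))) (out : Option (List (String × String))) : Prop := out = find_person_by_name_py_alt name persons
instance (name : String) (persons : List (List (String × String))) (out : Option (List (String × String))) : Decidable (Spec_find_person_by_name_py name persons out) := by unfold Spec_find_person_by_name_py; infer_instance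

-- ===== CLAIM (what is proved, stated in full; the proofs are below) =====
def Claim_equal_find_person_by_name_py : Prop := ∀ (name : String) (persons : List (List (String × String))), Dom_find_person_by_name_py name persons → Pre_find_person_by_name_py name persons → Spec_find_person_by_name_py name persons (find_person_by_name_py name persons)

-- ===== LEMMAS AND PROOFS =====
-- The one-pass scan equals: first exact match, else the carried first_partial, else first partial match.
theorem pvScan_eq (nl : String) (ps : List (List (String × String))) (fp : Option (List (String × String))) :
    pvScan nl ps fp =
      match pvLoopExact nl ps with
      | some p => some p
      | none => match fp with
                | some q => some q
                | none => pvLoopPartial nl ps := by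
  induction ps generalizing fp with
  | nil => cases fp <;> simp [pvScan, pvLoopExact, pvLoopPartial]
  | cons p rest ih =>
      simp only [pvScan, pvLoopExact, pvLoopPartial]
      by_cases hx : (PySem.Str.lower (pvGetName p) == nl) = true
      · simp [hx]
      · simp only [hx, if_false, Bool.false_eq_true]
        rw [ih]
        cases fp with
        | some q => simp
        | none =>
            cases pvLoopExact nl rest <;> split_ifs <;> simp_all

-- ===== VERDICT (by name: the statement is the Claim_ definition above) =====
theorem find_person_by_name_py_spec : Claim_equal_find_person_by_name_py := by
  intro name persons _hd _hp
  unfold Spec_find_person_by_name_py find_person_by_name_py find_person_by_name_py_alt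
  by_cases h : (name == "") = true
  · simp [h]
  · simp only [h, if_false, Bool.false_eq_true]
    rw [pvScan_eq]
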